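-- pv_equiv track=rewrite | github.com/DevMatrix1/dsa-practice | python/vedant_bhatnagar/DevsnestProblems_THA/Phase 1/DeckOfCards.py | solve
-- ===== SOURCE A (Python) =====
-- def gcd(a,b):
--     if b==0:
--         return a
--     return gcd(b, a%b)
--
-- def solve(n, deck):
--     # CODE HERE
--     m = {}
--     if n<2:
--         return 0
--     for i in deck:
--         if i in m:
--             m[i] += 1
--         else:
--             m[i] = 1
--
--     track = list(m.values())
--     curr_gcd = track[0]
--     for i in track:
--         if curr_gcd>i:
--             curr_gcd = gcd(curr_gcd, i)
--         else:
--             curr_gcd = gcd(i,curr_gcd)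
--     if curr_gcd > 1:
--         return 1
--     else:
--         return 0
-- ===== SOURCE B (Python) =====
-- def solve(n, deck):
--     if n < 2:
--         return 0
--     s = sorted(deck)
--     counts = []
--     run = 0
--     prev = None
--     for x in s:
--         if run != 0 and x == prev:
--             run += 1
--         else:
--             if run != 0:
--                 counts.append(run)
--             run = 1
--             prev = x
--     if run != 0:
--         counts.append(run)
--     g = counts[0]
--     for c in counts[1:]:
--         while c != 0:
--             g, c = c, g % c
--     return 1 if g > 1 else 0
-- ===== Notes on version B (the rewrite author's own statement) =====
-- stated objective: alternative
-- what changed: B replaces A's frequency-dict pass by sorting the deck and collecting run lengths of equal neighbours, and replaces A's recursive gcd helper by an iterative Euclid loop folded over the run lengths.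
import Mathlib
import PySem

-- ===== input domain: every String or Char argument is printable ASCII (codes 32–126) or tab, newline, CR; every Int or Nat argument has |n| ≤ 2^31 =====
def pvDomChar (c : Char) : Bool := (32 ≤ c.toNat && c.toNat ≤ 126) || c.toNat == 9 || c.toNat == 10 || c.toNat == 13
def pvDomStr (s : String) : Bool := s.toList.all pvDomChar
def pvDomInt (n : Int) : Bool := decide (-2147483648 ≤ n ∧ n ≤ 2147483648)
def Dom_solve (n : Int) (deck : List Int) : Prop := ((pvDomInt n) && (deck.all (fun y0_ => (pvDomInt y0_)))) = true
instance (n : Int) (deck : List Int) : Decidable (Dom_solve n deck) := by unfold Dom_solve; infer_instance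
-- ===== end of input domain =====

-- B replaces A's frequency dict by sort-then-group run lengths and A's recursive gcd by an iterative Euclid loop (alternative decomposition, same result).


-- termination fact for Python's `a % b` Euclid recursions (cited by both ports)
theorem pvModNatAbsLt (a b : Int) (hb : ¬ b = 0) : (PySem.Int.mod a b).natAbs < b.natAbs := by
  rcases lt_or_gt_of_ne hb with h | h
  · have := PySem.Int.mod_neg_bounds a h
    omega
  · have h1 := PySem.Int.mod_nonneg a h
    have h2 := PySem.Int.mod_lt a h
    omega

-- ===== PORT A =====
-- A's helper `gcd(a, b)`: recursive Euclid with Python `%`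
def pygcdA (a b : Int) : Int :=
  if h : b = 0 then a else pygcdA b (PySem.Int.mod a b)
termination_by b.natAbs
decreasing_by exact pvModNatAbsLt a b h

def solve (n : Int) (deck : List Int) : Int :=
  if n < 2 then 0
  else
    -- for i in deck: if i in m: m[i] += 1 else: m[i] = 1
    let m := deck.foldl
      (fun d i => if d.contains i then d.insert i (d.getD i 0 + 1) else d.insert i 1)
      PySem.Dict.empty
    let track := PySem.Dict.values m
    let curr := PySem.List.pyGetD track 0 0          -- track[0]; Pre_ excludes the IndexError (empty deck)
    let g := track.foldl (fun c i => if c > i then pygcdA c i else pygcdA i c) curr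
    if g > 1 then 1 else 0

-- ===== PORT B =====
-- B's inner `while c != 0: g, c = c, g % c` loop
def gcdLoopB (g c : Int) : Int :=
  if h : c = 0 then g else gcdLoopB c (PySem.Int.mod g c)
termination_by c.natAbs
decreasing_by exact pvModNatAbsLt g c h

-- one step of B's run-length loop over the sorted deck; state = (counts, run, prev)
def stepB (acc : List Int × Int × Option Int) (x : Int) : List Int × Int × Option Int :=
  if acc.2.1 ≠ 0 ∧ acc.2.2 = some x then (acc.1, acc.2.1 + 1, acc.2.2)
  else ((if acc.2.1 ≠ 0 then acc.1 ++ [acc.2.1] else acc.1), 1, some x)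

def solve_alt (n : Int) (deck : List Int) : Int :=
  if n < 2 then 0
  else
    let s := PySem.List.sorted deck (fun x => x) false
    let st := s.foldl stepB ([], 0, none)
    let counts := if st.2.1 ≠ 0 then st.1 ++ [st.2.1] else st.1
    let g0 := PySem.List.pyGetD counts 0 0           -- counts[0]; Pre_ excludes the IndexError (empty deck)
    let g := (PySem.List.slice counts (some 1) none).foldl (fun g c => gcdLoopB g c) g0
    if g > 1 then 1 else 0

-- ===== PRECONDITION & SPEC =====
-- Pre_ excludes only the inputs where A raises: n ≥ 2 with an empty deck hits track[0] → IndexError (B's counts[0] raises there too).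
def Pre_solve (n : Int) (deck : List Int) : Prop := n < 2 ∨ deck ≠ []
instance (n : Int) (deck : List Int) : Decidable (Pre_solve n deck) := by unfold Pre_solve; infer_instance
def pvWitness_solve : Int × List Int := (5, [1, 1, 2, 2, 3])

def Spec_solve (n : Int) (deck : List Int) (out : Int) : Prop := out = solve_alt n deck
instance (n : Int) (deck : List Int) (out : Int) : Decidable (Spec_solve n deck out) := by unfold Spec_solve; infer_instance

-- ===== CLAIM (what is proved, stated in full; the proofs are below) =====
def Claim_equal_solve : Prop := ∀ (n : Int) (deck : List Int), Dom_solve n deck → Pre_solve n deck → Spec_solve n deck (solve n deck)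

-- ===== LEMMAS AND PROOFS =====

-- gcd over Int as both ports compute it, written with Mathlib's Int.gcd
def gcdI (a b : Int) : Int := (Int.gcd a b : Int)

theorem pygcdA_eq_gcd (a b : Int) (ha : 0 ≤ a) (hb : 0 ≤ b) : pygcdA a b = gcdI a b := by
  rw [pygcdA]
  by_cases h : b = 0
  · subst h
    unfold gcdI
    rw [dif_pos rfl, Int.gcd_zero_right]
    omega
  · have hbpos : 0 < b := lt_of_le_of_ne hb (Ne.symm h)
    rw [dif_neg h]
    have hm := PySem.Int.mod_nonneg a hbpos
    rw [pygcdA_eq_gcd b _ hb hm]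
    rw [PySem.Int.mod_eq_emod_of_pos (a := a) hbpos]
    unfold gcdI
    rw [Int.gcd_comm b, Int.gcd_emod]
termination_by b.natAbs
decreasing_by exact pvModNatAbsLt a b h

theorem gcdLoopB_eq_pygcdA : ∀ (g c : Int), gcdLoopB g c = pygcdA g c := by
  intro g c
  rw [gcdLoopB, pygcdA]
  by_cases h : c = 0
  · simp [h]
  · rw [dif_neg h, dif_neg h, gcdLoopB_eq_pygcdA]
termination_by g c => c.natAbs
decreasing_by exact pvModNatAbsLt g c h

theorem gcdI_nonneg (a b : Int) : 0 ≤ gcdI a b := Int.natCast_nonneg _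

theorem foldl_stepA_eq_gcdI (l : List Int) : ∀ (c : Int), 0 ≤ c → (∀ x ∈ l, 0 ≤ x) →
    l.foldl (fun c i => if c > i then pygcdA c i else pygcdA i c) c = l.foldl gcdI c := by
  induction l with
  | nil => intro c _ _; rfl
  | cons x xs ih =>
    intro c hc hall
    have hx : 0 ≤ x := hall x (List.mem_cons_self)
    have hstep : (if c > x then pygcdA c x else pygcdA x c) = gcdI c x := by
      by_cases h : c > x
      · rw [if_pos h, pygcdA_eq_gcd c x hc hx]
      · rw [if_neg h, pygcdA_eq_gcd x c hx hc]
        unfold gcdI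
        rw [Int.gcd_comm]
    simp only [List.foldl_cons, hstep]
    exact ih _ (gcdI_nonneg c x) (fun y hy => hall y (List.mem_cons_of_mem _ hy))

theorem foldl_gcdLoopB_eq_gcdI (l : List Int) : ∀ (c : Int), 0 ≤ c → (∀ x ∈ l, 0 ≤ x) →
    l.foldl (fun g c => gcdLoopB g c) c = l.foldl gcdI c := by
  induction l with
  | nil => intro c _ _; rfl
  | cons x xs ih =>
    intro c hc hall
    have hx : 0 ≤ x := hall x (List.mem_cons_self)
    rw [List.foldl_cons, List.foldl_cons, gcdLoopB_eq_pygcdA, pygcdA_eq_gcd c x hc hx]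
    exact ih _ (gcdI_nonneg c x) (fun y hy => hall y (List.mem_cons_of_mem _ hy))

theorem foldl_gcdI_perm {l₁ l₂ : List Int} (h : l₁.Perm l₂) (b : Int) :
    l₁.foldl gcdI b = l₂.foldl gcdI b := by
  haveI : Std.Commutative (α := Int) gcdI := ⟨by
    intro a b; unfold gcdI; rw [Int.gcd_comm]⟩
  haveI : Std.Associative (α := Int) gcdI := ⟨by
    intro a b c
    unfold gcdI
    simp [Int.gcd, Nat.gcd_assoc]⟩
  exact h.foldl_eq b

-- A's dict loop is Counter(deck)
theorem foldA_eq_counter (deck : List Int) :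
    deck.foldl (fun d i => if d.contains i then d.insert i (d.getD i 0 + 1) else d.insert i 1)
      PySem.Dict.empty = PySem.Dict.counter deck := by
  rw [← PySem.Dict.foldl_insert_getD_add_one_eq_counter]
  congr 1
  funext d i
  by_cases h : d.contains i
  · rw [if_pos h]
  · rw [if_neg (by simp [h]), PySem.Dict.getD_of_not_contains d 0 (by simpa using h)]
    norm_num

-- the run lengths B's loop produces, as a recursive grouping of a sorted list
def flushB (st : List Int × Int × Option Int) : List Int := if st.2.1 ≠ 0 then st.1 ++ [st.2.1] else st.1

def RL : List Int → List Int
  | [] => []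
  | x :: xs => (1 + ((xs.takeWhile (fun y => y == x)).length : Int)) :: RL (xs.dropWhile (fun y => y == x))
termination_by l => l.length
decreasing_by simpa using Nat.lt_succ_of_le (List.length_dropWhile_le _ _)

theorem foldl_stepB_gen (l : List Int) : ∀ (counts : List Int) (run p : Int), 0 < run →
    l.Pairwise (· ≤ ·) → (∀ x ∈ l, p ≤ x) →
    flushB (l.foldl stepB (counts, run, some p)) =
      counts ++ (run + ((l.takeWhile (fun y => y == p)).length : Int)) :: RL (l.dropWhile (fun y => y == p)) := by
  induction l with
  | nil =>
    intro counts run p hrun _ _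
    simp only [List.foldl_nil, flushB, List.takeWhile_nil, List.dropWhile_nil, RL,
      List.length_nil, Nat.cast_zero, add_zero]
    rw [if_pos (by omega)]
  | cons x xs ih =>
    intro counts run p hrun hp hge
    rw [List.foldl_cons]
    by_cases hx : x = p
    · subst hx
      have hstep : stepB (counts, run, some x) x = (counts, run + 1, some x) := by
        simp only [stepB]
        rw [if_pos (by exact ⟨by omega, trivial⟩)]
      rw [hstep, ih counts (run + 1) x (by omega) hp.of_cons
        (fun y hy => (List.pairwise_cons.mp hp).1 y hy)]
      rw [List.takeWhile_cons_of_pos (by simp), List.dropWhile_cons_of_pos (by simp)]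
      simp only [List.length_cons]
      congr 2
      push_cast
      ring
    · have hstep : stepB (counts, run, some p) x = (counts ++ [run], 1, some x) := by
        simp only [stepB]
        rw [if_neg (by simp; intro _ hpx; exact hx hpx.symm), if_pos (by omega)]
      rw [hstep, ih (counts ++ [run]) 1 x (by omega) hp.of_cons
        (fun y hy => (List.pairwise_cons.mp hp).1 y hy)]
      rw [List.takeWhile_cons_of_neg (by simp [hx]), List.dropWhile_cons_of_neg (by simp [hx]),
        RL]
      simp

theorem foldl_stepB_eq_RL (l : List Int) (h : l.Pairwise (· ≤ ·)) :
    flushB (l.foldl stepB ([], 0, none)) = RL l := by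
  cases l with
  | nil => simp [flushB, RL]
  | cons x xs =>
    rw [List.foldl_cons]
    have hstep : stepB ([], 0, none) x = ([], 1, some x) := by
      simp [stepB]
    rw [hstep, foldl_stepB_gen xs [] 1 x one_pos h.of_cons
      (fun y hy => (List.pairwise_cons.mp h).1 y hy), RL]
    simp

theorem pv_not_mem_dropWhile : ∀ (xs : List Int) (x : Int), xs.Pairwise (· ≤ ·) →
    (∀ z ∈ xs, x ≤ z) → x ∉ xs.dropWhile (fun y => y == x) := by
  intro xs
  induction xs with
  | nil => intro x _ _; simp
  | cons y ys ih =>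
    intro x hp hle
    by_cases hy : (y == x) = true
    · rw [List.dropWhile_cons_of_pos (p := fun y => y == x) (a := y) (l := ys) hy]
      exact ih x hp.of_cons (fun z hz => hle z (List.mem_cons_of_mem _ hz))
    · rw [List.dropWhile_cons_of_neg (p := fun y => y == x) (a := y) (l := ys) hy]
      intro hmem
      have hyx : y ≠ x := by simpa using hy
      rcases List.mem_cons.mp hmem with h1 | h1
      · exact hyx h1.symm
      · have h2 : y ≤ x := (List.pairwise_cons.mp hp).1 x h1
        have h3 : x ≤ y := hle y List.mem_cons_self
        exact hyx (le_antisymm h2 h3)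

theorem RL_eq_map_count (l : List Int) (h : l.Pairwise (· ≤ ·)) :
    ∃ K : List Int, K.Nodup ∧ (∀ k, k ∈ K ↔ k ∈ l) ∧ RL l = K.map (fun k => (l.count k : Int)) := by
  induction hn : l.length using Nat.strong_induction_on generalizing l with
  | _ n ih =>
  cases l with
  | nil => exact ⟨[], by simp, by simp, by simp [RL]⟩
  | cons x xs =>
    set t := xs.takeWhile (fun y => y == x) with ht
    set d := xs.dropWhile (fun y => y == x) with hd
    have htd : t ++ d = xs := List.takeWhile_append_dropWhile
    have htx : ∀ y ∈ t, y = x := by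
      intro y hy
      have := List.mem_takeWhile_imp hy
      simpa using this
    have hdsub : d.Sublist xs := (List.dropWhile_suffix _).sublist
    have hdpair : d.Pairwise (· ≤ ·) := h.of_cons.sublist hdsub
    have hxle : ∀ z ∈ xs, x ≤ z := fun z hz => (List.pairwise_cons.mp h).1 z hz
    have hxd : x ∉ d := by
      rw [hd]
      exact pv_not_mem_dropWhile xs x h.of_cons hxle
    have hdlen : d.length < n := by
      have := List.length_dropWhile_le (fun y => y == x) xs
      rw [← hd] at this
      simp only [← hn, List.length_cons]
      omega
    obtain ⟨K', hK'nd, hK'mem, hK'eq⟩ := ih d.length hdlen d hdpair rfl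
    have hcountx : (x :: xs).count x = 1 + t.length := by
      rw [← htd, ← List.cons_append, List.count_append]
      have h1 : (x :: t).count x = 1 + t.length := by
        rw [List.count_cons_self, List.count_eq_length.mpr (fun b hb => (htx b hb).symm)]
        omega
      have h2 : d.count x = 0 := List.count_eq_zero.mpr hxd
      omega
    have hcountne : ∀ k, k ≠ x → (x :: xs).count k = d.count k := by
      intro k hk
      rw [← htd, ← List.cons_append, List.count_append]
      have h1 : (x :: t).count k = 0 := by
        rw [List.count_eq_zero]
        intro hmem
        rcases List.mem_cons.mp hmem with h1 | h1
        · exact hk h1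
        · exact hk (htx k h1)
      omega
    refine ⟨x :: K', ?_, ?_, ?_⟩
    · exact List.nodup_cons.mpr ⟨fun hx => hxd ((hK'mem x).mp hx), hK'nd⟩
    · intro k
      rw [List.mem_cons, List.mem_cons, hK'mem, ← htd, List.mem_append]
      constructor
      · rintro (h1 | h1)
        · exact Or.inl h1
        · exact Or.inr (Or.inr h1)
      · rintro (h1 | h1 | h1)
        · exact Or.inl h1
        · exact Or.inl (htx k h1)
        · exact Or.inr h1
    · rw [RL, ← ht, ← hd, hK'eq, List.map_cons]
      congr 1
      · rw [hcountx]
        push_cast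
        ring
      · apply List.map_congr_left
        intro k hk
        have hkd : k ∈ d := (hK'mem k).mp hk
        have hkx : k ≠ x := fun he => hxd (he ▸ hkd)
        rw [hcountne k hkx]

theorem foldl_gcdI_zero_cons (x : Int) (l : List Int) (hx : 0 ≤ x) :
    (x :: l).foldl gcdI 0 = l.foldl gcdI x := by
  rw [List.foldl_cons]
  congr 1
  unfold gcdI
  rw [Int.gcd_zero_left]
  omega

-- ===== VERDICT (by name: the statement is the Claim_ definition above) =====
theorem solve_spec : Claim_equal_solve := by
  intro n deck _ hpre
  unfold Spec_solve solve solve_alt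
  by_cases hn : n < 2
  · rw [if_pos hn, if_pos hn]
  · rw [if_neg hn, if_neg hn]
    have hdeck : deck ≠ [] := by
      rcases hpre with h | h
      · exact absurd h hn
      · exact h
    simp only []
    -- A side: the dict loop is Counter(deck), its values are counts over the distinct elements
    rw [foldA_eq_counter]
    have htrack : (PySem.Dict.counter deck).values
        = (PySem.Set.ofList deck).map (fun k => (deck.count k : Int)) := by
      show ((PySem.Dict.counter deck).items).map (·.2)
          = (PySem.Set.ofList deck).map (fun k => (deck.count k : Int))
      rw [PySem.Dict.items_counter]
      rw [List.map_map]
      rfl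
    -- B side: the run-length loop over the sorted deck yields counts over the distinct elements
    have hs_pair : (PySem.List.sorted deck (fun x => x) false).Pairwise (· ≤ ·) :=
      PySem.List.sorted_pairwise deck (fun x => x)
    have hs_perm : (PySem.List.sorted deck (fun x => x) false).Perm deck :=
      PySem.List.sorted_perm deck (fun x => x) false
    have hflush := foldl_stepB_eq_RL _ hs_pair
    unfold flushB at hflush
    obtain ⟨K, hKnd, hKmem, hKeq⟩ := RL_eq_map_count _ hs_pair
    rw [hflush, hKeq]
    have hKcount : K.map (fun k => ((PySem.List.sorted deck (fun x => x) false).count k : Int))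
        = K.map (fun k => (deck.count k : Int)) := by
      apply List.map_congr_left
      intro k _
      rw [hs_perm.count_eq]
    rw [hKcount, htrack]
    -- the two count lists are permutations of each other
    have hKperm : K.Perm (PySem.Set.ofList deck) := by
      rw [List.perm_ext_iff_of_nodup hKnd (PySem.Set.nodup_ofList deck)]
      intro k
      rw [hKmem, PySem.Set.mem_ofList, hs_perm.mem_iff]
    have hmapperm : (K.map (fun k => (deck.count k : Int))).Perm
        ((PySem.Set.ofList deck).map (fun k => (deck.count k : Int))) := hKperm.map _
    -- both lists are nonempty (deck is) and have nonnegative elements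
    obtain ⟨x0, hx0⟩ : ∃ x, x ∈ deck := List.exists_mem_of_ne_nil deck hdeck
    have hKne : K ≠ [] := by
      intro he
      rw [← List.mem_nil_iff x0, ← he, hKmem, hs_perm.mem_iff]
      exact hx0
    have hSne : PySem.Set.ofList deck ≠ [] := by
      intro he
      rw [← List.mem_nil_iff x0, ← he, PySem.Set.mem_ofList]
      exact hx0
    have hnonnegK : ∀ v ∈ K.map (fun k => (deck.count k : Int)), 0 ≤ v := by
      intro v hv
      obtain ⟨k, _, rfl⟩ := List.mem_map.mp hv
      exact Int.natCast_nonneg _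
    have hnonnegS : ∀ v ∈ (PySem.Set.ofList deck).map (fun k => (deck.count k : Int)), 0 ≤ v := by
      intro v hv
      obtain ⟨k, _, rfl⟩ := List.mem_map.mp hv
      exact Int.natCast_nonneg _
    cases hc : K.map (fun k => (deck.count k : Int)) with
    | nil => exact absurd (List.map_eq_nil_iff.mp hc) hKne
    | cons c0 cs =>
    cases htk : (PySem.Set.ofList deck).map (fun k => (deck.count k : Int)) with
    | nil => exact absurd (List.map_eq_nil_iff.mp htk) hSne
    | cons t0 ts =>
    rw [hc] at hmapperm hnonnegK
    rw [htk] at hmapperm hnonnegS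
    have hc0 : 0 ≤ c0 := hnonnegK c0 List.mem_cons_self
    have ht0 : 0 ≤ t0 := hnonnegS t0 List.mem_cons_self
    rw [PySem.List.pyGetD_zero_cons, PySem.List.pyGetD_zero_cons, PySem.List.slice_from_one, List.tail_cons]
    -- turn both folds into folds of gcdI, then into gcds of the whole lists, and use the permutation
    rw [foldl_stepA_eq_gcdI _ t0 ht0 hnonnegS,
      foldl_gcdLoopB_eq_gcdI _ c0 hc0 (fun y hy => hnonnegK y (List.mem_cons_of_mem _ hy))]
    have hA : (t0 :: ts).foldl gcdI t0 = (t0 :: ts).foldl gcdI 0 := by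
      rw [List.foldl_cons, List.foldl_cons]
      congr 1
      · unfold gcdI
        rw [Int.gcd_zero_left, Int.gcd_self]
    have hB : (c0 :: cs).foldl gcdI 0 = cs.foldl gcdI c0 := foldl_gcdI_zero_cons c0 cs hc0
    rw [hA, ← hB, foldl_gcdI_perm hmapperm 0]
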